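-- pv_equiv track=rewrite | github.com/Pyzaaa/IslandGA-JSSP | Flow shopGPU/Flow-Shop-GA.py | neh_sequence
-- ===== SOURCE A (Python) =====
-- from typing import List, Tuple
--
-- def makespan(order: List[int], times: List[List[int]]) -> int:
--     """Compute makespan (Cmax) for a given job order."""
--     num_machines = len(times[0])
--     machine_ready = [0] * num_machines
--     for job_idx in order:
--         prev_completion = 0
--         for m in range(num_machines):
--             start = max(machine_ready[m], prev_completion)
--             completion = start + times[job_idx][m]
--             machine_ready[m] = completion
--             prev_completion = completion
--     return machine_ready[-1]
--
-- def neh_sequence(times: List[List[int]]) -> List[int]: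
--     """Construct a job sequence using the NEH heuristic."""
--     n = len(times)
--     jobs_sorted = sorted(range(n), key=lambda j: -sum(times[j]))
--     seq = [jobs_sorted[0]]
--     for j in jobs_sorted[1:]:
--         best_seq = None
--         best_val = float("inf")
--         for pos in range(len(seq) + 1):
--             trial = seq[:pos] + [j] + seq[pos:]
--             val = makespan(trial, times)
--             if val < best_val:
--                 best_val = val
--                 best_seq = trial
--         seq = best_seq
--     return seq
-- ===== SOURCE B (Python) =====
-- from typing import List
--
-- def _advance(ready: List[int], row: List[int]) -> List[int]:
--     """One job's pass over the machines: new completion vector."""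
--     prev = 0
--     out = []
--     for r, t in zip(ready, row):
--         prev = max(r, prev) + t
--         out.append(prev)
--     return out
--
-- def neh_sequence(times: List[List[int]]) -> List[int]:
--     """NEH with partial-schedule reuse: prefix completion vectors are computed
--     once per insertion round, so each trial only re-simulates the suffix."""
--     m = len(times[0])
--     order = sorted(range(len(times)), key=lambda j: -sum(times[j]))
--     seq = [order[0]]
--     for j in order[1:]:
--         row_j = times[j]
--         # E[p] = machine-completion vector of seq[:p]
--         E = [[0] * m]
--         st = E[0]
--         for job in seq:
--             st = _advance(st, times[job])
--             E.append(st)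
--         best_pos = 0
--         best_val = None
--         for pos in range(len(seq) + 1):
--             st = _advance(E[pos], row_j)
--             for job in seq[pos:]:
--                 st = _advance(st, times[job])
--             val = st[-1]
--             if best_val is None or val < best_val:
--                 best_val = val
--                 best_pos = pos
--         seq[best_pos:best_pos] = [j]
--     return seq
-- ===== Notes on version B (the rewrite author's own statement) =====
-- stated objective: alternative
-- what changed: B computes the completion-time vector of every prefix of the current sequence once per insertion round and evaluates each trial position by re-simulating only the inserted job and the suffix, instead of rebuilding the trial list and re-simulating the whole schedule from scratch for every position.
import Mathlib
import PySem

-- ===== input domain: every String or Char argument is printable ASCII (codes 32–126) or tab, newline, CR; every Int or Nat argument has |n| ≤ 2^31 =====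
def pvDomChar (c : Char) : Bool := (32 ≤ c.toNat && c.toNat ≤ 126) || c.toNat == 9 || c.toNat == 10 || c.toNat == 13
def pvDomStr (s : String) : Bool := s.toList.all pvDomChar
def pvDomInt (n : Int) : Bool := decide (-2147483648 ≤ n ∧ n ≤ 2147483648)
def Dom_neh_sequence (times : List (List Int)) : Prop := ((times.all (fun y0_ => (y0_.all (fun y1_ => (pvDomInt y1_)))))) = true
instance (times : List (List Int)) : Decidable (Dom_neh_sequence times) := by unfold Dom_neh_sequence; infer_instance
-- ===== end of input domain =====

-- B reuses the partial-schedule completion vectors of the current sequence, so each trial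
-- insertion only re-simulates the inserted job and the suffix (same results, different algorithm).

-- times[j] as a row (shared indexing shorthand, used by both ports)
def pvRow (times : List (List Int)) (j : Int) : List Int := (PySem.List.pyGet? times j).getD []

-- ===== PORT A =====
-- inner 'for m in range(num_machines)' loop of makespan
def pvStepA (times : List (List Int)) (nm : Nat) (ready : List Int) (jobIdx : Int) : List Int :=
  ((PySem.List.pyRange 0 (nm : Int) 1).foldl
    (fun (s : List Int × Int) m =>
      let start := max (PySem.List.pyGetD s.1 m 0) s.2
      let completion := start + PySem.List.pyGetD (pvRow times jobIdx) m 0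
      (PySem.List.pySetD s.1 m completion, completion))
    (ready, 0)).1

def pvMakespan (order : List Int) (times : List (List Int)) : Int :=
  let numMachines := (pvRow times 0).length
  PySem.List.pyGetD (order.foldl (pvStepA times numMachines) (List.replicate numMachines 0)) (-1) 0

def neh_sequence (times : List (List Int)) : List Int :=
  let n := times.length
  let jobsSorted := PySem.List.sorted (PySem.List.pyRange 0 (n : Int) 1)
      (fun j => -((pvRow times j).sum)) false
  (PySem.List.slice jobsSorted (some 1) none).foldl
    (fun seq j =>
      let best := (PySem.List.pyRange 0 ((seq.length : Int) + 1) 1).foldl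
        (fun (b : Option (List Int) × Option Int) pos =>
          let trial := PySem.List.slice seq none (some pos) ++ [j] ++ PySem.List.slice seq (some pos) none
          let val := pvMakespan trial times
          match b.2 with
          | none => (some trial, some val)
          | some bv => if val < bv then (some trial, some val) else b)
        (none, none)
      best.1.getD [])
    [(PySem.List.pyGet? jobsSorted 0).getD 0]

-- ===== PORT B =====
-- _advance: one job's pass over the machines (loop over zip(ready, row) building the new vector)
def pvAdvanceGo : List (Int × Int) → Int → List Int
  | [], _ => []
  | (r, t) :: rest, prev =>
      let c := max r prev + t
      c :: pvAdvanceGo rest c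

def pvAdvance (ready row : List Int) : List Int := pvAdvanceGo (ready.zip row) 0

-- the 'for job in seq: st = _advance(st, times[job]); E.append(st)' loop
def pvBuildE (times : List (List Int)) (st : List Int) : List Int → List (List Int)
  | [] => [st]
  | job :: rest => st :: pvBuildE times (pvAdvance st (pvRow times job)) rest

def neh_sequence_alt (times : List (List Int)) : List Int :=
  let m := (pvRow times 0).length
  let order := PySem.List.sorted (PySem.List.pyRange 0 (times.length : Int) 1)
      (fun j => -((pvRow times j).sum)) false
  (PySem.List.slice order (some 1) none).foldl
    (fun seq j =>
      let rowJ := pvRow times j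
      let E := pvBuildE times (List.replicate m 0) seq
      let best := (PySem.List.pyRange 0 ((seq.length : Int) + 1) 1).foldl
        (fun (b : Int × Option Int) pos =>
          let st0 := pvAdvance (PySem.List.pyGetD E pos []) rowJ
          let st := (PySem.List.slice seq (some pos) none).foldl
              (fun st job => pvAdvance st (pvRow times job)) st0
          let val := PySem.List.pyGetD st (-1) 0
          match b.2 with
          | none => (pos, some val)
          | some bv => if val < bv then (pos, some val) else b)
        (0, none)
      PySem.List.slice seq none (some best.1) ++ [j] ++ PySem.List.slice seq (some best.1) none)
    [(PySem.List.pyGet? order 0).getD 0]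

-- ===== PRECONDITION & SPEC =====
-- Pre_ admits exactly the inputs where A returns: a nonempty matrix whose first row is nonempty
-- and no row is shorter than the first (otherwise A raises IndexError).
def Pre_neh_sequence (times : List (List Int)) : Prop :=
  times ≠ [] ∧ 0 < (times.headD []).length ∧ ∀ row ∈ times, (times.headD []).length ≤ row.length
instance (times : List (List Int)) : Decidable (Pre_neh_sequence times) := by
  unfold Pre_neh_sequence; infer_instance
def pvWitness_neh_sequence : List (List Int) := [[3, 1], [2, 4], [1, 1]]

def Spec_neh_sequence (times : List (List Int)) (out : List Int) : Prop := out = neh_sequence_alt times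
instance (times : List (List Int)) (out : List Int) : Decidable (Spec_neh_sequence times out) := by unfold Spec_neh_sequence; infer_instance

-- ===== CLAIM (what is proved, stated in full; the proofs are below) =====
def Claim_equal_neh_sequence : Prop := ∀ (times : List (List Int)), Dom_neh_sequence times → Pre_neh_sequence times → Spec_neh_sequence times (neh_sequence times)

-- ===== LEMMAS AND PROOFS =====

-- B's per-job step, as a function (proof vocabulary)
def pvStepB (times : List (List Int)) (st : List Int) (job : Int) : List Int :=
  pvAdvance st (pvRow times job)

-- a job index is valid when its row is at least nm long
def pvValid (times : List (List Int)) (nm : Nat) (j : Int) : Prop :=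
  nm ≤ (pvRow times j).length

-- trial sequence: seq[:pos] + [j] + seq[pos:]
def pvTrial (seq : List Int) (j : Int) (p : Int) : List Int :=
  PySem.List.slice seq none (some p) ++ [j] ++ PySem.List.slice seq (some p) none

lemma pvAdvanceGo_length (l : List (Int × Int)) (p : Int) : (pvAdvanceGo l p).length = l.length := by
  induction l generalizing p with
  | nil => rfl
  | cons h t ih => simp [pvAdvanceGo, ih]

lemma pvAdvance_length (ready row : List Int) (h : ready.length ≤ row.length) :
    (pvAdvance ready row).length = ready.length := by
  simp [pvAdvance, pvAdvanceGo_length, List.length_zip, Nat.min_eq_left h]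

-- A's machine loop equals _advance (generalized over a processed prefix)
lemma pvStepA_eq_advance_aux (times : List (List Int)) (jobIdx : Int) :
    ∀ (rs done : List Int) (prev : Int),
      done.length + rs.length ≤ (pvRow times jobIdx).length →
      ((PySem.List.pyRange (done.length : Int) ((done.length : Int) + (rs.length : Int)) 1).foldl
        (fun (s : List Int × Int) m =>
          let start := max (PySem.List.pyGetD s.1 m 0) s.2
          let completion := start + PySem.List.pyGetD (pvRow times jobIdx) m 0
          (PySem.List.pySetD s.1 m completion, completion))
        (done ++ rs, prev)).1
      = done ++ pvAdvanceGo (rs.zip ((pvRow times jobIdx).drop done.length)) prev := by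
  intro rs
  induction rs with
  | nil =>
      intro done prev _
      rw [PySem.List.pyRange_one_eq_nil (by simp)]
      simp [pvAdvanceGo]
  | cons r rs' ih =>
      intro done prev hlen
      have hdl : done.length < (pvRow times jobIdx).length := by
        rw [List.length_cons] at hlen; omega
      rw [PySem.List.pyRange_one_cons (by push_cast [List.length_cons]; omega)]
      simp only [List.foldl_cons]
      have h1 : PySem.List.pyGetD (done ++ r :: rs') ((done.length : Int)) 0 = r := by
        simp [List.getD_eq_getElem?_getD]
      have h2 : PySem.List.pyGetD (pvRow times jobIdx) ((done.length : Int)) 0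
          = (pvRow times jobIdx)[done.length] := by
        simp [List.getD_eq_getElem?_getD, List.getElem?_eq_getElem hdl]
      have h3 : PySem.List.pySetD (done ++ r :: rs') ((done.length : Int))
            (max r prev + (pvRow times jobIdx)[done.length])
          = done ++ (max r prev + (pvRow times jobIdx)[done.length]) :: rs' := by
        simp [List.set_cons_zero]
      simp only [h1, h2, h3]
      set c := max r prev + (pvRow times jobIdx)[done.length] with hc
      have key := ih (done ++ [c]) c (by rw [List.length_cons] at hlen; simp; omega)
      have hrange : PySem.List.pyRange ((done.length : Int) + 1)
            ((done.length : Int) + ((r :: rs').length : Int)) 1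
          = PySem.List.pyRange (((done ++ [c]).length : Nat) : Int)
            ((((done ++ [c]).length : Nat) : Int) + ((rs'.length : Nat) : Int)) 1 := by
        simp; ring_nf
      have hst : done ++ c :: rs' = (done ++ [c]) ++ rs' := by simp
      rw [hrange, hst, key]
      rw [← List.getElem_cons_drop hdl, List.zip_cons_cons]
      simp only [pvAdvanceGo, List.append_assoc, List.singleton_append]
      rw [hc]
      simp

lemma pvStepA_eq_stepB (times : List (List Int)) (nm : Nat) (ready : List Int) (j : Int)
    (hr : ready.length = nm) (hv : pvValid times nm j) :
    pvStepA times nm ready j = pvStepB times ready j := by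
  have := pvStepA_eq_advance_aux times j ready [] 0 (by simpa [pvValid, hr] using hv)
  simpa [pvStepA, pvStepB, pvAdvance, hr] using this

-- the job fold with A's step equals the fold with B's step (length invariant carried along)
lemma pvFold_eq (times : List (List Int)) (nm : Nat) :
    ∀ (order : List Int) (st : List Int), st.length = nm →
      (∀ j ∈ order, pvValid times nm j) →
      order.foldl (pvStepA times nm) st = order.foldl (pvStepB times) st ∧
      (order.foldl (pvStepB times) st).length = nm := by
  intro order
  induction order with
  | nil => intro st hst _; exact ⟨rfl, hst⟩
  | cons j js ih =>
      intro st hst hv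
      have hj : pvValid times nm j := hv j (by simp)
      have hlen : (pvStepB times st j).length = nm := by
        rw [pvStepB, pvAdvance_length _ _ (by rw [hst]; exact hj)]; exact hst
      have := ih (pvStepB times st j) hlen (fun x hx => hv x (by simp [hx]))
      simp only [List.foldl_cons, pvStepA_eq_stepB times nm st j hst hj]
      exact this

-- E[pos] is the completion vector of seq[:pos]
lemma pvBuildE_getD (times : List (List Int)) :
    ∀ (seq : List Int) (st : List Int) (pos : Nat), pos ≤ seq.length →
      PySem.List.pyGetD (pvBuildE times st seq) (pos : Int) [] =
        (seq.take pos).foldl (pvStepB times) st := by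
  intro seq
  induction seq with
  | nil =>
      intro st pos hpos
      have : pos = 0 := by simpa using hpos
      subst this
      simp [pvBuildE]
  | cons job rest ih =>
      intro st pos hpos
      cases pos with
      | zero => simp [pvBuildE]
      | succ p =>
          rw [pvBuildE]
          have h1 : PySem.List.pyGetD
              (st :: pvBuildE times (pvAdvance st (pvRow times job)) rest) (((p + 1 : Nat)) : Int) []
              = PySem.List.pyGetD (pvBuildE times (pvAdvance st (pvRow times job)) rest) ((p : Nat) : Int) [] := by
            rw [PySem.List.pyGetD, PySem.List.pyGetD,
                show (((p + 1 : Nat)) : Int) = ((p : Nat) : Int) + 1 by push_cast; ring,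
                PySem.List.pyGet?_cons_succ]
          rw [h1, ih _ p (by simpa using hpos)]
          simp [pvStepB]

-- the value A computes for a trial insertion equals the value B computes (prefix reuse)
lemma pvVal_eq (times : List (List Int)) (seq : List Int) (j : Int) (pos : Int)
    (h0 : 0 ≤ pos) (h1 : pos ≤ (seq.length : Int))
    (hj : pvValid times (pvRow times 0).length j)
    (hseq : ∀ x ∈ seq, pvValid times (pvRow times 0).length x) :
    pvMakespan (pvTrial seq j pos) times
      = PySem.List.pyGetD
          ((PySem.List.slice seq (some pos) none).foldl (pvStepB times)
            (pvAdvance (PySem.List.pyGetD (pvBuildE times (List.replicate (pvRow times 0).length 0) seq) pos [])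
              (pvRow times j))) (-1) 0 := by
  set nm := (pvRow times 0).length with hnm
  have htr : ∀ x ∈ pvTrial seq j pos, pvValid times nm x := by
    intro x hx
    simp only [pvTrial, List.mem_append, List.mem_singleton] at hx
    rcases hx with (hx | rfl) | hx
    · exact hseq x (PySem.List.mem_of_mem_slice seq _ _ hx)
    · exact hj
    · exact hseq x (PySem.List.mem_of_mem_slice seq _ _ hx)
  have hfold := pvFold_eq times nm (pvTrial seq j pos) (List.replicate nm 0) (by simp) htr
  rw [pvMakespan]
  rw [hfold.1]
  have hsplit : pvTrial seq j pos = seq.take pos.toNat ++ [j] ++ PySem.List.slice seq (some pos) none := by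
    rw [pvTrial, PySem.List.slice_to seq h0]
  rw [hsplit, List.foldl_append, List.foldl_append]
  have hE : PySem.List.pyGetD (pvBuildE times (List.replicate nm 0) seq) pos []
      = (seq.take pos.toNat).foldl (pvStepB times) (List.replicate nm 0) := by
    have h2 := pvBuildE_getD times seq (List.replicate nm 0) pos.toNat (by omega)
    rwa [Int.toNat_of_nonneg h0] at h2
  rw [hE]
  rfl

-- the argmin fold, generically: once a best value is present, A's state is
-- (candidate at B's position, same value), provided the two value functions agree
lemma pvFoldBestGen {A : Type} (f : Int → A) (vA vB : Int → Int) :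
    ∀ (ps : List Int) (s : Int) (v : Int), (∀ p ∈ ps, vA p = vB p) →
      (ps.foldl (fun (b : Option A × Option Int) pos =>
          match b.2 with
          | none => (some (f pos), some (vA pos))
          | some bv => if vA pos < bv then (some (f pos), some (vA pos)) else b)
        (some (f s), some v))
      = (some (f ((ps.foldl (fun (b : Int × Option Int) pos =>
            match b.2 with
            | none => (pos, some (vB pos))
            | some bv => if vB pos < bv then (pos, some (vB pos)) else b) (s, some v)).1)),
         (ps.foldl (fun (b : Int × Option Int) pos =>
            match b.2 with
            | none => (pos, some (vB pos))
            | some bv => if vB pos < bv then (pos, some (vB pos)) else b) (s, some v)).2) := by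
  intro ps
  induction ps with
  | nil => intro s v _; rfl
  | cons p ps' ih =>
      intro s v hval
      have hp : vA p = vB p := hval p (by simp)
      simp only [List.foldl_cons]
      by_cases hlt : vB p < v
      · simp only [hp, if_pos hlt]
        exact ih p (vB p) (fun q hq => hval q (by simp [hq]))
      · simp only [hp, if_neg hlt]
        exact ih s v (fun q hq => hval q (by simp [hq]))

-- full argmin fold from the (none, none) start, for a nonempty position list
lemma pvFoldBestGen' {A : Type} (f : Int → A) (vA vB : Int → Int) (d : A) :
    ∀ (ps : List Int), (∀ p ∈ ps, vA p = vB p) → ps ≠ [] →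
      ((ps.foldl (fun (b : Option A × Option Int) pos =>
          match b.2 with
          | none => (some (f pos), some (vA pos))
          | some bv => if vA pos < bv then (some (f pos), some (vA pos)) else b)
        (none, none)).1.getD d)
      = f ((ps.foldl (fun (b : Int × Option Int) pos =>
            match b.2 with
            | none => (pos, some (vB pos))
            | some bv => if vB pos < bv then (pos, some (vB pos)) else b) (0, none)).1) := by
  intro ps hval hne
  cases ps with
  | nil => exact absurd rfl hne
  | cons p rest =>
      simp only [List.foldl_cons]
      have hp : vA p = vB p := hval p (by simp)
      have := pvFoldBestGen f vA vB rest p (vB p) (fun q hq => hval q (by simp [hq]))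
      simp only [hp]
      rw [this]
      simp

-- every member of a trial insertion is either the inserted job or a member of seq
lemma pvTrial_valid (times : List (List Int)) (nm : Nat) (s : List Int) (x : Int) (p : Int)
    (hs : ∀ y ∈ s, pvValid times nm y) (hx : pvValid times nm x) :
    ∀ y ∈ PySem.List.slice s none (some p) ++ [x] ++ PySem.List.slice s (some p) none,
      pvValid times nm y := by
  intro y hy
  simp only [List.mem_append, List.mem_singleton] at hy
  rcases hy with (hy | rfl) | hy
  · exact hs y (PySem.List.mem_of_mem_slice s _ _ hy)
  · exact hx
  · exact hs y (PySem.List.mem_of_mem_slice s _ _ hy)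

-- generic outer fold: if the two step functions agree on invariant states and valid inputs,
-- the folds agree
lemma pvOuterGen {S : Type} (fA fB : S → Int → S) (valid : Int → Prop) (inv : S → Prop)
    (hstep : ∀ s x, valid x → inv s → fA s x = fB s x ∧ inv (fB s x)) :
    ∀ (js : List Int) (s : S), (∀ x ∈ js, valid x) → inv s → js.foldl fA s = js.foldl fB s := by
  intro js
  induction js with
  | nil => intro s _ _; rfl
  | cons x js' ih =>
      intro s hjs hs
      obtain ⟨h1, h2⟩ := hstep s x (hjs x (by simp)) hs
      simp only [List.foldl_cons, h1]
      exact ih (fB s x) (fun y hy => hjs y (by simp [hy])) h2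

-- one round of insertion: A's body equals B's body on valid states
lemma pvInner_eq (times : List (List Int)) (seq : List Int) (j : Int)
    (hj : pvValid times (pvRow times 0).length j)
    (hseq : ∀ x ∈ seq, pvValid times (pvRow times 0).length x) :
    ((PySem.List.pyRange 0 ((seq.length : Int) + 1) 1).foldl
        (fun (b : Option (List Int) × Option Int) pos =>
          let trial := PySem.List.slice seq none (some pos) ++ [j] ++ PySem.List.slice seq (some pos) none
          let val := pvMakespan trial times
          match b.2 with
          | none => (some trial, some val)
          | some bv => if val < bv then (some trial, some val) else b)
        (none, none)).1.getD []
    = (fun (p : Int) => PySem.List.slice seq none (some p) ++ [j] ++ PySem.List.slice seq (some p) none)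
        (((PySem.List.pyRange 0 ((seq.length : Int) + 1) 1).foldl
          (fun (b : Int × Option Int) pos =>
            let st0 := pvAdvance
              (PySem.List.pyGetD (pvBuildE times (List.replicate (pvRow times 0).length 0) seq) pos [])
              (pvRow times j)
            let st := (PySem.List.slice seq (some pos) none).foldl
                (fun st job => pvAdvance st (pvRow times job)) st0
            let val := PySem.List.pyGetD st (-1) 0
            match b.2 with
            | none => (pos, some val)
            | some bv => if val < bv then (pos, some val) else b)
          (0, none)).1) := by
  have hvals : ∀ p ∈ PySem.List.pyRange 0 ((seq.length : Int) + 1) 1,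
      pvMakespan (PySem.List.slice seq none (some p) ++ [j] ++ PySem.List.slice seq (some p) none) times
      = PySem.List.pyGetD
          ((PySem.List.slice seq (some p) none).foldl
            (fun st job => pvAdvance st (pvRow times job))
            (pvAdvance (PySem.List.pyGetD (pvBuildE times (List.replicate (pvRow times 0).length 0) seq) p [])
              (pvRow times j))) (-1) 0 := by
    intro p hp
    rw [PySem.List.mem_pyRange_one] at hp
    exact pvVal_eq times seq j p hp.1 (by omega) hj hseq
  have hne : PySem.List.pyRange 0 ((seq.length : Int) + 1) 1 ≠ [] := by
    rw [PySem.List.pyRange_one_cons (by omega)]; simp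
  exact pvFoldBestGen'
    (fun p => PySem.List.slice seq none (some p) ++ [j] ++ PySem.List.slice seq (some p) none)
    (fun p => pvMakespan (PySem.List.slice seq none (some p) ++ [j] ++ PySem.List.slice seq (some p) none) times)
    (fun p => PySem.List.pyGetD
          ((PySem.List.slice seq (some p) none).foldl
            (fun st job => pvAdvance st (pvRow times job))
            (pvAdvance (PySem.List.pyGetD (pvBuildE times (List.replicate (pvRow times 0).length 0) seq) p [])
              (pvRow times j))) (-1) 0)
    [] (PySem.List.pyRange 0 ((seq.length : Int) + 1) 1) hvals hne

-- ===== VERDICT (by name: the statement is the Claim_ definition above) =====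
theorem neh_sequence_spec : Claim_equal_neh_sequence := by
  intro times _ hpre
  obtain ⟨hne, hpos, hrows⟩ := hpre
  show neh_sequence times = neh_sequence_alt times
  simp only [neh_sequence, neh_sequence_alt]
  set nm := (pvRow times 0).length with hnm
  have hnm' : nm = (times.headD []).length := by
    cases times with
    | nil => exact absurd rfl hne
    | cons r0 rest => simp [hnm, pvRow]
  have hvalid : ∀ x ∈ PySem.List.sorted (PySem.List.pyRange 0 (times.length : Int) 1)
      (fun j => -((pvRow times j).sum)) false, pvValid times nm x := by
    intro x hx
    have hx' : x ∈ PySem.List.pyRange 0 (times.length : Int) 1 :=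
      (PySem.List.sorted_perm _ _ _).mem_iff.mp hx
    rw [PySem.List.mem_pyRange_one] at hx'
    have hlt : x.toNat < times.length := by omega
    have hrow : pvRow times x = times[x.toNat] := by
      rw [pvRow, PySem.List.pyGet?_eq_some_getElem times hx'.1 hx'.2]
      rfl
    rw [pvValid, hrow, hnm']
    exact hrows _ (List.getElem_mem hlt)
  have horder_ne : PySem.List.sorted (PySem.List.pyRange 0 (times.length : Int) 1)
      (fun j => -((pvRow times j).sum)) false ≠ [] := by
    rw [Ne, PySem.List.sorted_eq_nil_iff]
    have : (0 : Int) < (times.length : Int) := by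
      cases times with
      | nil => exact absurd rfl hne
      | cons r0 rest => simp
    rw [PySem.List.pyRange_one_cons this]
    simp
  set order := PySem.List.sorted (PySem.List.pyRange 0 (times.length : Int) 1)
      (fun j => -((pvRow times j).sum)) false with horder
  have hseed : ∀ x ∈ [(PySem.List.pyGet? order 0).getD 0], pvValid times nm x := by
    obtain ⟨h, t, he⟩ := List.exists_cons_of_ne_nil horder_ne
    intro x hx
    rw [he, PySem.List.pyGet?_zero_cons] at hx
    simp at hx
    subst hx
    exact hvalid _ (by rw [he]; simp)
  refine pvOuterGen _ _ (pvValid times nm)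
    (fun s => ∀ x ∈ s, pvValid times nm x) ?_ _ _
    (fun x hx => hvalid x (PySem.List.mem_of_mem_slice order _ _ hx)) hseed
  intro s x hx hs
  constructor
  · exact pvInner_eq times s x hx hs
  · exact pvTrial_valid times nm s x _ hs hx
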